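-- pv_equiv track=rewrite | github.com/mjpigg/rank_voting | rank_vote.py | find_loser
-- ===== SOURCE A (Python) =====
-- def find_loser(tally):
--     losers = []
--     order = [(c,cnt) for c,cnt in tally.items()]
--     order.sort(key=lambda k:k[1], reverse=True)
--     for candidate,count in tally.items():
--         if count == order[-1][1]:
--             losers.append(candidate)
--     return losers
-- ===== SOURCE B (Python) =====
-- def find_loser(tally):
--     if not tally:
--         return []
--     low = min(tally.values())
--     return [c for c, cnt in tally.items() if cnt == low]
-- ===== Notes on version B (the rewrite author's own statement) =====
-- stated objective: faster
-- what changed: B replaces A's descending sort (used only to read the minimum count off the last element) with a direct min() over the values followed by one filtering pass.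
import Mathlib
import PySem

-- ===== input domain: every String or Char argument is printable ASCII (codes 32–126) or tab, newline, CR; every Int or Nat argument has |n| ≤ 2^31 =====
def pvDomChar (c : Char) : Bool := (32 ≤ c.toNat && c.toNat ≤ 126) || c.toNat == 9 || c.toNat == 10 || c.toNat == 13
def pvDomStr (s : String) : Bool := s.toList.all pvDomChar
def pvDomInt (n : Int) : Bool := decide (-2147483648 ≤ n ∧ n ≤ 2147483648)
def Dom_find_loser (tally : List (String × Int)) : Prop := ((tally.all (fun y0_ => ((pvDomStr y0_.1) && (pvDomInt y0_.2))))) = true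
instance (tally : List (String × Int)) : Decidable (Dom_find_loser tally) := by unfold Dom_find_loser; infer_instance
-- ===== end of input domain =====

-- B computes the minimum count directly instead of sorting; the two ports return the same list.

-- ===== PORT A =====
def find_loser (tally : List (String × Int)) : List String :=
  -- order = [(c,cnt) for c,cnt in tally.items()]; order.sort(key=..., reverse=True)
  let order := PySem.List.sorted tally (fun k => k.2) true
  -- for candidate,count in tally.items(): if count == order[-1][1]: losers.append(candidate)
  tally.foldl (fun losers p =>
    match PySem.List.pyGet? order (-1) with
    | some last => if p.2 == last.2 then losers ++ [p.1] else losers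
    | none => losers) []   -- unreachable: the loop body only runs when tally (hence order) is nonempty

-- ===== PORT B =====
def find_loser_alt (tally : List (String × Int)) : List String :=
  match PySem.List.min? (tally.map Prod.snd) (fun v => v) with
  | none => []   -- `if not tally: return []`
  | some low => (tally.filter (fun p => p.2 == low)).map Prod.fst

-- ===== PRECONDITION & SPEC =====
def Spec_find_loser (tally : List (String × Int)) (out : List String) : Prop := out = find_loser_alt tally
instance (tally : List (String × Int)) (out : List String) : Decidable (Spec_find_loser tally out) := by unfold Spec_find_loser; infer_instance

-- ===== CLAIM (what is proved, stated in full; the proofs are below) =====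
def Claim_equal_find_loser : Prop := ∀ (tally : List (String × Int)), Dom_find_loser tally → Spec_find_loser tally (find_loser tally)

-- ===== LEMMAS AND PROOFS =====

-- In a list pairwise-descending on .2, the last element's count is minimal.
theorem pv_last_min {ℓ : List (String × Int)} (h : ℓ.Pairwise (fun a b => b.2 ≤ a.2))
    (hne : ℓ ≠ []) : ∀ y ∈ ℓ, (ℓ.getLast hne).2 ≤ y.2 := by
  induction ℓ with
  | nil => exact absurd rfl hne
  | cons x t ih =>
    rw [List.pairwise_cons] at h
    obtain ⟨hx, ht⟩ := h
    intro y hy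
    cases t with
    | nil =>
      simp at hy; simp [hy]
    | cons z t' =>
      have hlast : ((x :: z :: t').getLast hne) = ((z :: t').getLast (by simp)) := by
        simp [List.getLast]
      have hz : (z :: t') ≠ [] := by simp
      rcases List.mem_cons.mp hy with rfl | hy'
      · rw [hlast]
        exact hx _ (List.getLast_mem hz)
      · rw [hlast]; exact ih ht hz _ hy'

theorem find_loser_eq_alt (tally : List (String × Int)) :
    find_loser tally = find_loser_alt tally := by
  cases htal : tally with
  | nil => simp [find_loser, find_loser_alt, PySem.List.min?]
  | cons p t =>
    -- nonempty case
    set xs := p :: t with hxs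
    set order := PySem.List.sorted xs (fun k => k.2) true with horder
    have hone : order ≠ [] := by
      intro h0
      have := (PySem.List.sorted_eq_nil_iff (xs := xs) (key := fun k => k.2) (rev := true)).mp h0
      simp [hxs] at this
    have hget : PySem.List.pyGet? order (-1) = some (order.getLast hone) := by
      rw [PySem.List.pyGet?_neg_one, List.getLast?_eq_getLast_of_ne_nil hone]
    -- the minimum of the counts
    have hmin : ∃ low, PySem.List.min? (xs.map Prod.snd) (fun v => v) = some low := by
      cases hm : PySem.List.min? (xs.map Prod.snd) (fun v => v) with
      | none =>
        have := (PySem.List.min?_eq_none_iff (xs := xs.map Prod.snd) (key := fun v => v)).mp hm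
        simp [hxs] at this
      | some low => exact ⟨low, rfl⟩
    rcases hmin with ⟨low, hlow⟩
    -- last.2 = low
    have hpair : order.Pairwise (fun a b => b.2 ≤ a.2) :=
      PySem.List.sorted_pairwise_rev (xs := xs) (key := fun k => k.2)
    have hlast_mem : order.getLast hone ∈ xs :=
      (PySem.List.mem_sorted _ _ _ _).mp (List.getLast_mem hone)
    have h1 : low ≤ (order.getLast hone).2 :=
      PySem.List.min?_isMin hlow _ (List.mem_map_of_mem hlast_mem)
    have h2 : (order.getLast hone).2 ≤ low := by
      rcases List.mem_map.mp (PySem.List.min?_mem hlow) with ⟨q, hq, hq2⟩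
      have hq' : q ∈ order := (PySem.List.mem_sorted _ _ _ _).mpr hq
      calc (order.getLast hone).2 ≤ q.2 := pv_last_min hpair hone q hq'
        _ = low := hq2
    have hll : (order.getLast hone).2 = low := le_antisymm h2 h1
    -- reduce A's fold and B's match
    show (xs.foldl (fun losers q =>
        match PySem.List.pyGet? order (-1) with
        | some last => if q.2 == last.2 then losers ++ [q.1] else losers
        | none => losers) []) = find_loser_alt xs
    rw [hget]
    simp only []
    rw [show (fun (losers : List String) (q : String × Int) =>
          if q.2 == (order.getLast hone).2 then losers ++ [q.1] else losers)
        = (fun losers q => if q.2 == low then losers ++ [q.1] else losers) by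
      funext losers q; rw [hll]]
    rw [PySem.List.foldl_append_if (p := fun q => q.2 == low) (f := Prod.fst)]
    simp [find_loser_alt, hlow]

-- ===== VERDICT (by name: the statement is the Claim_ definition above) =====
theorem find_loser_spec : Claim_equal_find_loser := by
  intro tally _
  unfold Spec_find_loser
  exact find_loser_eq_alt tally
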